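-- pv_equiv track=rewrite | github.com/Treader7/LSB-Stegangrophy | BMP-Stego-Core.py | decode_binary_from_pixels
-- ===== SOURCE A (Python) =====
-- def extract_bit_from_byte(byte_value):
--     # extarct lsb from a byte
--     return '1' if (byte_value & 0x01) else '0'
--
-- def decode_binary_from_pixels(pixel_data, use_alpha=True, max_bits=None):
--     # decode binary message from pixel LSB
--     if len(pixel_data) == 0:
--         return ""
--
--     # Determine format
--     if len(pixel_data) % 4 == 0 and use_alpha:
--         bytes_per_pixel = 4
--         channels_per_pixel = 4
--     else:
--         bytes_per_pixel = 3
--         channels_per_pixel = 3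
--
--     binary_message = ""
--
--     if max_bits is None:
--         # Extract all bits
--         for i in range(0, len(pixel_data), bytes_per_pixel):
--             for channel in range(min(channels_per_pixel, len(pixel_data) - i)):
--                 binary_message += extract_bit_from_byte(pixel_data[i + channel])
--     else:
--         # Extract up to max_bits
--         bits_extracted = 0
--         for i in range(0, len(pixel_data), bytes_per_pixel):
--             for channel in range(min(channels_per_pixel, len(pixel_data) - i)):
--                 if bits_extracted >= max_bits:
--                     break
--                 binary_message += extract_bit_from_byte(pixel_data[i + channel])
--                 bits_extracted += 1
--             if bits_extracted >= max_bits: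
--                 break
--
--     return binary_message
-- ===== SOURCE B (Python) =====
-- def decode_binary_from_pixels(pixel_data, use_alpha=True, max_bits=None):
--     # flat single pass: every byte's LSB, then clamp with a slice
--     bits = ''.join('1' if b & 1 else '0' for b in pixel_data)
--     if max_bits is None:
--         return bits
--     return bits[:max(max_bits, 0)]
-- ===== Notes on version B (the rewrite author's own statement) =====
-- stated objective: simpler
-- what changed: B drops the pixel-format branching and nested per-pixel/per-channel loops with break bookkeeping: since both formats walk every byte contiguously, B builds the whole bit string in one flat join over the bytes and applies max_bits as a single clamped slice.
import Mathlib
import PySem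

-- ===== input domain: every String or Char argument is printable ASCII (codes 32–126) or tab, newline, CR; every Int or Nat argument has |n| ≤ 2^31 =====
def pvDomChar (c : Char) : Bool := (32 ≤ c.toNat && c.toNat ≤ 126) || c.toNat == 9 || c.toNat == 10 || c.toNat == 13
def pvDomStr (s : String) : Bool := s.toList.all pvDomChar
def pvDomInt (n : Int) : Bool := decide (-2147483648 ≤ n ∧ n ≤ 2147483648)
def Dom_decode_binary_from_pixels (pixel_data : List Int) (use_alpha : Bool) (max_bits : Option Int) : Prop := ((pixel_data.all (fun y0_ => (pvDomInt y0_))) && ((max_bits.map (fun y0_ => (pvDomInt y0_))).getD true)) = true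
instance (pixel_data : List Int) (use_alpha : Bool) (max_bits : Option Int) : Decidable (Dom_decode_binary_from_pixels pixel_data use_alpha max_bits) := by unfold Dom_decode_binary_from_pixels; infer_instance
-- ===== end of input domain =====

-- B drops A's pixel-format branching and nested per-pixel/per-channel loops: every byte is
-- visited contiguously either way, so B joins all LSB bits in one flat pass and applies
-- max_bits as a single clamped slice (objective: simpler).


-- ===== PORT A =====
def extract_bit_from_byte (byte_value : Int) : String :=
  if PySem.Int.band byte_value 1 ≠ 0 then "1" else "0"

-- inner 'for channel in range(…)' of the max_bits branch, with its 'break' (early return)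
def decodeInnerBreak (pixel_data : List Int) (m i : Int) :
    List Int → Int → String → Int × String
  | [], cnt, bm => (cnt, bm)
  | ch :: rest, cnt, bm =>
    if cnt ≥ m then (cnt, bm)
    else decodeInnerBreak pixel_data m i rest (cnt + 1)
           (bm ++ extract_bit_from_byte (PySem.List.pyGetD pixel_data (i + ch) 0))

-- outer 'for i in range(0, len, bytes_per_pixel)' of the max_bits branch, with its 'break'
def decodeOuterBreak (pixel_data : List Int) (m cpp : Int) :
    List Int → Int → String → String
  | [], _, bm => bm
  | i :: rest, cnt, bm =>
    let p := decodeInnerBreak pixel_data m i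
               (PySem.List.pyRange 0 (min cpp ((pixel_data.length : Int) - i)) 1) cnt bm
    if p.1 ≥ m then p.2 else decodeOuterBreak pixel_data m cpp rest p.1 p.2

def decode_binary_from_pixels (pixel_data : List Int) (use_alpha : Bool) (max_bits : Option Int) : String :=
  if pixel_data.length = 0 then ""
  else
    let bytes_per_pixel : Int := if pixel_data.length % 4 = 0 ∧ use_alpha = true then 4 else 3
    let channels_per_pixel : Int := if pixel_data.length % 4 = 0 ∧ use_alpha = true then 4 else 3
    match max_bits with
    | none =>
      (PySem.List.pyRange 0 (pixel_data.length : Int) bytes_per_pixel).foldl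
        (fun bm i =>
          (PySem.List.pyRange 0 (min channels_per_pixel ((pixel_data.length : Int) - i)) 1).foldl
            (fun bm2 ch => bm2 ++ extract_bit_from_byte (PySem.List.pyGetD pixel_data (i + ch) 0)) bm)
        ""
    | some m =>
      decodeOuterBreak pixel_data m channels_per_pixel
        (PySem.List.pyRange 0 (pixel_data.length : Int) bytes_per_pixel) 0 ""

-- ===== PORT B =====
def decode_binary_from_pixels_alt (pixel_data : List Int) (use_alpha : Bool) (max_bits : Option Int) : String :=
  let bits := PySem.Str.join "" (pixel_data.map (fun b => if PySem.Int.band b 1 ≠ 0 then "1" else "0"))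
  match max_bits with
  | none => bits
  | some m => PySem.Str.slice bits none (some (max m 0))

-- ===== PRECONDITION & SPEC =====
def Spec_decode_binary_from_pixels (pixel_data : List Int) (use_alpha : Bool) (max_bits : Option Int) (out : String) : Prop := out = decode_binary_from_pixels_alt pixel_data use_alpha max_bits
instance (pixel_data : List Int) (use_alpha : Bool) (max_bits : Option Int) (out : String) : Decidable (Spec_decode_binary_from_pixels pixel_data use_alpha max_bits out) := by unfold Spec_decode_binary_from_pixels; infer_instance

-- ===== CLAIM (what is proved, stated in full; the proofs are below) =====
def Claim_equal_decode_binary_from_pixels : Prop := ∀ (pixel_data : List Int) (use_alpha : Bool) (max_bits : Option Int), Dom_decode_binary_from_pixels pixel_data use_alpha max_bits → Spec_decode_binary_from_pixels pixel_data use_alpha max_bits (decode_binary_from_pixels pixel_data use_alpha max_bits)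

-- ===== LEMMAS AND PROOFS =====

-- the LSB of a byte, as a character
def pvBitChar (b : Int) : Char := if PySem.Int.band b 1 ≠ 0 then '1' else '0'

lemma pv_str_ext {a b : String} (h : a.toList = b.toList) : a = b :=
  String.toList_inj.mp h

lemma pv_extract_toList (b : Int) : (extract_bit_from_byte b).toList = [pvBitChar b] := by
  unfold extract_bit_from_byte pvBitChar; split_ifs <;> rfl

lemma pv_flatten_singletons {α : Type} (l : List α) : (l.map (fun c => [c])).flatten = l := by
  induction l with
  | nil => rfl
  | cons x xs ih => simp [ih]

lemma pv_foldl_append {α : Type} (l : List α) (f : α → String) (acc : String) :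
    (l.foldl (fun s x => s ++ f x) acc).toList
      = acc.toList ++ (l.map (fun x => (f x).toList)).flatten := by
  induction l generalizing acc with
  | nil => simp
  | cons x xs ih => simp [ih, String.toList_append]

lemma pv_pyRange_nil {a b s : Int} (hs : 0 < s) (hab : b ≤ a) : PySem.List.pyRange a b s = [] := by
  rw [PySem.List.pyRange_of_pos _ _ hs, if_neg (by omega)]; simp

lemma pv_pyRange_cons {a b s : Int} (hs : 0 < s) (hab : a < b) :
    PySem.List.pyRange a b s = a :: PySem.List.pyRange (a + s) b s := by
  rw [PySem.List.pyRange_of_pos _ _ hs, PySem.List.pyRange_of_pos _ _ hs]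
  by_cases h2 : a + s < b
  · have hq0 : (0:Int) ≤ (b - (a + s) + s - 1) / s := Int.ediv_nonneg (by omega) (by omega)
    have hsum : b - a + s - 1 = (b - (a + s) + s - 1) + 1 * s := by ring
    have hdiv : (b - a + s - 1) / s = (b - (a + s) + s - 1) / s + 1 := by
      rw [hsum, Int.add_mul_ediv_right _ _ (by omega : s ≠ 0)]
    rw [if_pos hab, if_pos h2, hdiv]
    have htn : ((b - (a + s) + s - 1) / s + 1).toNat = ((b - (a + s) + s - 1) / s).toNat + 1 := by
      omega
    rw [htn]
    apply List.ext_getElem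
    · simp
    · intro j hj1 hj2
      cases j with
      | zero => simp
      | succ jj =>
        simp only [List.getElem_map, List.getElem_range, List.getElem_cons_succ]
        push_cast
        ring
  · rw [if_pos hab, if_neg h2]
    have h1 : (b - a + s - 1) / s = 1 := by
      have hsum : b - a + s - 1 = (b - a - 1) + 1 * s := by ring
      rw [hsum, Int.add_mul_ediv_right _ _ (by omega : s ≠ 0),
        Int.ediv_eq_zero_of_lt (by omega) (by omega)]
      norm_num
    rw [h1]
    simp

lemma pv_map_chunk (pd : List Int) (i k : Nat) (h : i + k ≤ pd.length) :
    (PySem.List.pyRange 0 (k : Int) 1).map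
        (fun ch => pvBitChar (PySem.List.pyGetD pd ((i : Int) + ch) 0))
      = ((pd.drop i).take k).map pvBitChar := by
  induction k with
  | zero =>
    rw [show ((0 : Nat) : Int) = 0 by rfl, pv_pyRange_nil one_pos le_rfl]
    simp
  | succ n ih =>
    have hcast : ((n + 1 : Nat) : Int) = (n : Int) + 1 := by push_cast; ring
    rw [hcast, PySem.List.pyRange_one_succ_right (by positivity), List.map_append,
      ih (by omega)]
    have hidx : PySem.List.pyGetD pd ((i : Int) + (n : Int)) 0 = pd[i + n]'(by omega) := by
      have hc : ((i : Int) + (n : Int)) = ((i + n : Nat) : Int) := by push_cast; ring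
      rw [hc, PySem.List.pyGetD_eq_getElem pd 0 (by positivity) (by exact_mod_cast (by omega : i + n < pd.length))]
      simp only [Int.toNat_natCast]
    have h1 : (pd.drop i).take (n + 1) = (pd.drop i).take n ++ [pd[i + n]'(by omega)] := by
      rw [List.take_succ]
      congr 1
      rw [List.getElem?_drop, List.getElem?_eq_getElem (by omega)]
      rfl
    rw [h1, List.map_append]
    simp [hidx]

lemma pv_outer_none (pd : List Int) (bpp : Int) (hb : 0 < bpp) :
    ∀ (fuel : Nat) (i : Int), 0 ≤ i → (pd.length : Int) ≤ i + fuel → ∀ (acc : String),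
    ((PySem.List.pyRange i (pd.length : Int) bpp).foldl
       (fun bm ii =>
         (PySem.List.pyRange 0 (min bpp ((pd.length : Int) - ii)) 1).foldl
           (fun bm2 ch => bm2 ++ extract_bit_from_byte (PySem.List.pyGetD pd (ii + ch) 0)) bm)
       acc).toList
      = acc.toList ++ (pd.drop i.toNat).map pvBitChar := by
  intro fuel
  induction fuel with
  | zero =>
    intro i hi hlen acc
    rw [pv_pyRange_nil hb (by omega)]
    simp [List.drop_eq_nil_of_le (by omega : pd.length ≤ i.toNat)]
  | succ n ih =>
    intro i hi hlen acc
    by_cases hend : (pd.length : Int) ≤ i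
    · rw [pv_pyRange_nil hb hend]
      simp [List.drop_eq_nil_of_le (by omega : pd.length ≤ i.toNat)]
    · push_neg at hend
      rw [pv_pyRange_cons hb hend, List.foldl_cons,
        ih (i + bpp) (by omega) (by push_cast at hlen ⊢; omega), pv_foldl_append]
      set k : Nat := (min bpp ((pd.length : Int) - i)).toNat with hk
      have hkcast : min bpp ((pd.length : Int) - i) = (k : Int) := by
        rw [hk, Int.toNat_of_nonneg (by omega)]
      have hmap : (PySem.List.pyRange 0 (min bpp ((pd.length : Int) - i)) 1).map
            (fun ch => pvBitChar (PySem.List.pyGetD pd (i + ch) 0))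
          = ((pd.drop i.toNat).take k).map pvBitChar := by
        rw [hkcast]
        have h3 := pv_map_chunk pd i.toNat k (by omega)
        have hc : ((i.toNat : Nat) : Int) = i := Int.toNat_of_nonneg hi
        rw [hc] at h3
        exact h3
      have hlist : (PySem.List.pyRange 0 (min bpp ((pd.length : Int) - i)) 1).map
            (fun ch => (extract_bit_from_byte (PySem.List.pyGetD pd (i + ch) 0)).toList)
          = (((pd.drop i.toNat).take k).map pvBitChar).map (fun c => [c]) := by
        rw [← hmap, List.map_map]
        apply List.map_congr_left
        intro ch _
        simp [pv_extract_toList, Function.comp]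
      rw [hlist, pv_flatten_singletons]
      have hsplit : ((pd.drop i.toNat).take k).map pvBitChar
            ++ (pd.drop (i + bpp).toNat).map pvBitChar
          = (pd.drop i.toNat).map pvBitChar := by
        rw [← List.map_append]
        congr 1
        by_cases hcase : i + bpp ≤ (pd.length : Int)
        · have hk' : k = bpp.toNat := by omega
          have hd : (i + bpp).toNat = i.toNat + bpp.toNat := by omega
          rw [hk', hd, ← List.drop_drop]
          exact List.take_append_drop _ _
        · have h1 : (pd.drop i.toNat).take k = pd.drop i.toNat :=
            List.take_of_length_le (by simp [List.length_drop]; omega)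
          have h2 : pd.drop (i + bpp).toNat = [] := List.drop_eq_nil_of_le (by omega)
          rw [h1, h2, List.append_nil]
      rw [List.append_assoc, hsplit]

lemma pv_innerB (pd : List Int) (m i : Int) :
    ∀ (cs : List Int) (cnt : Int) (bm : String),
      (decodeInnerBreak pd m i cs cnt bm).1
          = cnt + min (cs.length : Int) (max (m - cnt) 0) ∧
      (decodeInnerBreak pd m i cs cnt bm).2.toList
          = bm.toList ++ (cs.take (m - cnt).toNat).map
              (fun ch => pvBitChar (PySem.List.pyGetD pd (i + ch) 0)) := by
  intro cs
  induction cs with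
  | nil =>
    intro cnt bm
    refine ⟨?_, ?_⟩
    · simp only [decodeInnerBreak, List.length_nil]
      push_cast
      omega
    · simp [decodeInnerBreak]
  | cons c rest ih =>
    intro cnt bm
    by_cases h : cnt ≥ m
    · rw [decodeInnerBreak, if_pos h]
      refine ⟨?_, ?_⟩
      · simp only [List.length_cons]
        push_cast
        omega
      · have ht : (m - cnt).toNat = 0 := by omega
        simp [ht]
    · rw [decodeInnerBreak, if_neg h]
      obtain ⟨ih1, ih2⟩ := ih (cnt + 1) (bm ++ extract_bit_from_byte (PySem.List.pyGetD pd (i + c) 0))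
      refine ⟨?_, ?_⟩
      · rw [ih1]
        simp only [List.length_cons]
        push_cast
        omega
      · rw [ih2, String.toList_append, pv_extract_toList]
        have ht : (m - cnt).toNat = (m - (cnt + 1)).toNat + 1 := by omega
        rw [ht, List.take_succ_cons]
        simp [List.append_assoc]

lemma pv_outerB (pd : List Int) (m bpp : Int) (hb : 0 < bpp) :
    ∀ (fuel : Nat) (i : Int), 0 ≤ i → (pd.length : Int) ≤ i + fuel → ∀ (cnt : Int) (bm : String),
      (decodeOuterBreak pd m bpp (PySem.List.pyRange i (pd.length : Int) bpp) cnt bm).toList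
        = bm.toList ++ ((pd.drop i.toNat).take (m - cnt).toNat).map pvBitChar := by
  intro fuel
  induction fuel with
  | zero =>
    intro i hi hlen cnt bm
    rw [pv_pyRange_nil hb (by omega)]
    simp [decodeOuterBreak, List.drop_eq_nil_of_le (by omega : pd.length ≤ i.toNat)]
  | succ n ih =>
    intro i hi hlen cnt bm
    by_cases hend : (pd.length : Int) ≤ i
    · rw [pv_pyRange_nil hb hend]
      simp [decodeOuterBreak, List.drop_eq_nil_of_le (by omega : pd.length ≤ i.toNat)]
    · push_neg at hend
      rw [pv_pyRange_cons hb hend]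
      rw [decodeOuterBreak]
      obtain ⟨h1, h2⟩ := pv_innerB pd m i
        (PySem.List.pyRange 0 (min bpp ((pd.length : Int) - i)) 1) cnt bm
      set k : Nat := (min bpp ((pd.length : Int) - i)).toNat with hk
      have hkcast : min bpp ((pd.length : Int) - i) = (k : Int) := by
        rw [hk, Int.toNat_of_nonneg (by omega)]
      have hlenrange : ((PySem.List.pyRange 0 (min bpp ((pd.length : Int) - i)) 1).length : Int)
          = (k : Int) := by
        rw [PySem.List.length_pyRange_one]; omega
      have hmap : (PySem.List.pyRange 0 (min bpp ((pd.length : Int) - i)) 1).map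
            (fun ch => pvBitChar (PySem.List.pyGetD pd (i + ch) 0))
          = ((pd.drop i.toNat).take k).map pvBitChar := by
        rw [hkcast]
        have h3 := pv_map_chunk pd i.toNat k (by omega)
        have hc : ((i.toNat : Nat) : Int) = i := Int.toNat_of_nonneg hi
        rw [hc] at h3
        exact h3
      split_ifs with hbreak
      · rw [h2]
        congr 1
        have ht : (m - cnt).toNat ≤ k := by omega
        have hcg := congrArg (List.take (m - cnt).toNat) hmap
        rw [← List.map_take, ← List.map_take, List.take_take, min_eq_left ht] at hcg
        exact hcg
      · push_neg at hbreak
        rw [ih (i + bpp) (by omega) (by push_cast at hlen ⊢; omega), h2]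
        have hmle : m - cnt > 0 ∧ (k : Int) < m - cnt := by
          constructor <;> omega
        have htake_all : (PySem.List.pyRange 0 (min bpp ((pd.length : Int) - i)) 1).take (m - cnt).toNat
            = PySem.List.pyRange 0 (min bpp ((pd.length : Int) - i)) 1 :=
          List.take_of_length_le (by omega)
        rw [htake_all, hmap]
        have hrec : (m - (cnt + min ((PySem.List.pyRange 0 (min bpp ((pd.length : Int) - i)) 1).length : Int) (max (m - cnt) 0))).toNat
            = (m - cnt).toNat - k := by rw [hlenrange]; omega
        rw [h1, hrec]
        have hget : (pd.drop ((i + bpp).toNat)).take ((m - cnt).toNat - k)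
            = (pd.drop (i.toNat + k)).take ((m - cnt).toNat - k) := by
          by_cases hcase : i + bpp ≤ (pd.length : Int)
          · have e : (i + bpp).toNat = i.toNat + k := by omega
            rw [e]
          · have e1 : pd.drop ((i + bpp).toNat) = [] := List.drop_eq_nil_of_le (by omega)
            have e2 : pd.drop (i.toNat + k) = [] := List.drop_eq_nil_of_le (by omega)
            rw [e1, e2]
        have hsplit : (pd.drop i.toNat).take (m - cnt).toNat
            = (pd.drop i.toNat).take k ++ ((pd.drop (i.toNat + k)).take ((m - cnt).toNat - k)) := by
          conv_lhs => rw [show (m - cnt).toNat = k + ((m - cnt).toNat - k) from by omega]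
          rw [List.take_add, List.drop_drop]
        rw [hget, hsplit, List.map_append]
        simp [List.append_assoc]

lemma pv_alt_toList (pd : List Int) (ua : Bool) (mb : Option Int) :
    (decode_binary_from_pixels_alt pd ua mb).toList =
      match mb with
      | none => pd.map pvBitChar
      | some m => (pd.map pvBitChar).take (max m 0).toNat := by
  have hbits : (PySem.Str.join ""
      (pd.map (fun b => if PySem.Int.band b 1 ≠ 0 then "1" else "0"))).toList
      = pd.map pvBitChar := by
    rw [PySem.Str.toList_join]
    have hm : (pd.map (fun b => if PySem.Int.band b 1 ≠ 0 then "1" else "0")).map String.toList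
        = (pd.map pvBitChar).map (fun c => [c]) := by
      rw [List.map_map, List.map_map]
      apply List.map_congr_left
      intro b _
      by_cases h : PySem.Int.band b 1 ≠ 0 <;> simp [h, pvBitChar, Function.comp]
    rw [hm]
    have : ("" : String).toList = [] := rfl
    rw [this]
    exact PySem.Chars.join_nil_singletons (pd.map pvBitChar)
  unfold decode_binary_from_pixels_alt
  cases mb with
  | none => simpa using hbits
  | some m =>
    simp only
    rw [PySem.Str.toList_slice, PySem.Chars.slice_eq_listSlice,
      PySem.List.slice_to _ (le_max_right m 0), hbits]

-- ===== VERDICT (by name: the statement is the Claim_ definition above) =====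
theorem decode_binary_from_pixels_spec : Claim_equal_decode_binary_from_pixels := by
  intro pd ua mb _hdom
  unfold Spec_decode_binary_from_pixels
  apply pv_str_ext
  rw [pv_alt_toList]
  unfold decode_binary_from_pixels
  by_cases hnil : pd.length = 0
  · have hpd : pd = [] := List.length_eq_zero_iff.mp hnil
    subst hpd
    cases mb <;> simp
  · rw [if_neg hnil]
    dsimp only
    set bpp : Int := if pd.length % 4 = 0 ∧ ua = true then 4 else 3 with hbpp
    have hb : 0 < bpp := by rw [hbpp]; split_ifs <;> norm_num
    cases mb with
    | none =>
      rw [pv_outer_none pd bpp hb pd.length 0 le_rfl (by simp) ""]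
      simp
    | some m =>
      rw [pv_outerB pd m bpp hb pd.length 0 le_rfl (by simp) 0 ""]
      have : (max m 0).toNat = (m - 0).toNat := by omega
      simp [this]
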